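-- pv_equiv track=rewrite | github.com/yyoongs/CodingTest-Practice | 프로그래머스/코테 고득점 KIT/완전탐색/모의고사/모의고사.py | solution
-- ===== SOURCE A (Python) =====
-- def solution(answers):
--     answer = [[0, 1], [0, 2], [0, 3]]
--     p1 = [1, 2, 3, 4, 5] * ((10000 // 5) + 1)
--     p2 = [2, 1, 2, 3, 2, 4, 2, 5] * ((10000 // 7) + 1)
--     p3 = [3, 3, 1, 1, 2, 2, 4, 4, 5, 5] * ((10000 // 10) + 1)
--
--     for idx, a in enumerate(answers):
--         if p1[idx] == a:
--             answer[0][0] += 1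
--         if p2[idx] == a:
--             answer[1][0] += 1
--         if p3[idx] == a:
--             answer[2][0] += 1
--
--     answer.sort(key=lambda x: x[0], reverse=True)
--
--     result = [answer[0][1]]
--
--     for ans, idx in answer[1:]:
--         if ans == answer[0][0]:
--             result.append(idx)
--     return result
-- ===== SOURCE B (Python) =====
-- def solution(answers):
--     # Count per residue class: pattern j matches answers[i] exactly when
--     # answers[i] == base[j][i % L], so score_j is the sum, over each offset r
--     # of the cycle, of how many elements of the stride-L slice answers[r::L]
--     # equal the fixed value base[j][r].
--     bases = ([1, 2, 3, 4, 5],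
--              [2, 1, 2, 3, 2, 4, 2, 5],
--              [3, 3, 1, 1, 2, 2, 4, 4, 5, 5])
--     s1, s2, s3 = (sum(answers[r::len(b)].count(b[r]) for r in range(len(b)))
--                   for b in bases)
--     m = max(s1, s2, s3)
--     return [j for j, s in ((1, s1), (2, s2), (3, s3)) if s == m]
-- ===== Notes on version B (the rewrite author's own statement) =====
-- stated objective: alternative
-- what changed: B traverses by residue class instead of element by element: each score is a sum over the cycle offsets r of answers[r::L].count(base[r]) (stride-L slices plus list.count, no per-element if-chain and no 10000-element expanded patterns), and the tied winners are collected by max-then-filter instead of A's [[score,idx]] stable reverse sort with a tail scan.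
import Mathlib
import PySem

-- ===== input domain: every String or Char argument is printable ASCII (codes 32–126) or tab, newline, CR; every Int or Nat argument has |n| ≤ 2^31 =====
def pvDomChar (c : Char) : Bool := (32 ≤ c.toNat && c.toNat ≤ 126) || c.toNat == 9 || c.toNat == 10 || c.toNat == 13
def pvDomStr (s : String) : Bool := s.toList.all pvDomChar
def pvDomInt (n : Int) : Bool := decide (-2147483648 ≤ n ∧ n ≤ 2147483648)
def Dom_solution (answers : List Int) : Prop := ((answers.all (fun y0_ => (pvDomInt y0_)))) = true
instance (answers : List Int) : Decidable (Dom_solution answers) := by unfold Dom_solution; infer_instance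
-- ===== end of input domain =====

-- B counts per residue class (answers[r::L].count(base[r]) summed over the cycle offsets r)
-- instead of A's element-by-element pass over 10000+-element expanded pattern lists, and
-- collects the tied winners by max-then-filter instead of A's sort-then-scan (objective: alternative).

-- ===== PORT A =====
-- one step of A's loop: answer[0][0]/[1][0]/[2][0] += 1 on a pattern match
-- (state = the three [score, number] pairs of A's 'answer' list)
def solStepA (p1 p2 p3 : List Int) (st : (Int × Int) × (Int × Int) × (Int × Int)) (ia : Int × Int) :
    (Int × Int) × (Int × Int) × (Int × Int) :=
  let st := if PySem.List.pyGetD p1 ia.1 0 == ia.2 then ((st.1.1 + 1, st.1.2), st.2) else st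
  let st := if PySem.List.pyGetD p2 ia.1 0 == ia.2 then (st.1, (st.2.1.1 + 1, st.2.1.2), st.2.2) else st
  if PySem.List.pyGetD p3 ia.1 0 == ia.2 then (st.1, st.2.1, (st.2.2.1 + 1, st.2.2.2)) else st
  -- pyGetD's default 0 is never reached inside Pre_solution (Python raises IndexError past the pattern length)

def solution (answers : List Int) : List Int :=
  let p1 := PySem.List.pyRepeat [1, 2, 3, 4, 5] (PySem.Int.floordiv 10000 5 + 1)
  let p2 := PySem.List.pyRepeat [2, 1, 2, 3, 2, 4, 2, 5] (PySem.Int.floordiv 10000 7 + 1)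
  let p3 := PySem.List.pyRepeat [3, 3, 1, 1, 2, 2, 4, 4, 5, 5] (PySem.Int.floordiv 10000 10 + 1)
  let st := (PySem.List.enumerate answers 0).foldl (solStepA p1 p2 p3) ((0, 1), (0, 2), (0, 3))
  let answer := PySem.List.sorted [st.1, st.2.1, st.2.2] (fun x => x.1) true
  let top := answer.headD (0, 0)   -- answer[0]; the sorted list always has 3 elements
  top.2 :: (answer.tail.foldl (fun r p => if p.1 == top.1 then r ++ [p.2] else r) [])

-- ===== PORT B =====
-- answers[r::L] for 0 <= r, 1 <= L: hand port of the stride-L slice (PySem has no step slices);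
-- exact for these bounds: it is the elements at indices r, r+L, r+2L, ...
def strideSlice {a : Type} (xs : List a) (L : Nat) : List a :=
  match xs with
  | [] => []
  | x :: t => x :: strideSlice (t.drop (L - 1)) L
termination_by xs.length
decreasing_by simp [List.length_drop]

-- sum(answers[r::len(b)].count(b[r]) for r in range(len(b)))
def scoreB (answers base : List Int) : Int :=
  (List.range base.length).foldl
    (fun s r => s + (PySem.List.count (strideSlice (answers.drop r) base.length) (base.getD r 0) : Int)) 0

def solution_alt (answers : List Int) : List Int :=
  let s1 := scoreB answers [1, 2, 3, 4, 5]
  let s2 := scoreB answers [2, 1, 2, 3, 2, 4, 2, 5]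
  let s3 := scoreB answers [3, 3, 1, 1, 2, 2, 4, 4, 5, 5]
  let m := max s1 (max s2 s3)
  (if s1 == m then [(1 : Int)] else []) ++ (if s2 == m then [2] else []) ++
    (if s3 == m then [3] else [])

-- ===== PRECONDITION & SPEC =====
-- A raises IndexError when len(answers) > 10005 (its first pattern list has only 10005 entries);
-- Pre_ excludes exactly those inputs.
def Pre_solution (answers : List Int) : Prop := answers.length ≤ 10005
instance (answers : List Int) : Decidable (Pre_solution answers) := by unfold Pre_solution; infer_instance
def pvWitness_solution : List Int := [1, 2, 3, 4, 5, 1, 2]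

def Spec_solution (answers : List Int) (out : List Int) : Prop := out = solution_alt answers
instance (answers : List Int) (out : List Int) : Decidable (Spec_solution answers out) := by unfold Spec_solution; infer_instance

-- ===== CLAIM (what is proved, stated in full; the proofs are below) =====
def Claim_equal_solution : Prop := ∀ (answers : List Int), Dom_solution answers → Pre_solution answers → Spec_solution answers (solution answers)

-- ===== LEMMAS AND PROOFS =====

theorem strideSlice_nil {a : Type} (L : Nat) : strideSlice ([] : List a) L = [] := by
  rw [strideSlice.eq_def]

theorem strideSlice_cons {a : Type} (x : a) (t : List a) (L : Nat) :
    strideSlice (x :: t) L = x :: strideSlice (t.drop (L - 1)) L := by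
  rw [strideSlice.eq_def]

-- the common yardstick: one-pass cyclic match count starting at logical index k
def cnt (base : List Int) (k : Nat) (ans : List Int) : Int :=
  match ans with
  | [] => 0
  | a :: t => (if base.getD (k % base.length) 0 == a then (1 : Int) else 0) + cnt base (k + 1) t

-- rotated residue-class sum: SR base j ans = sum over r < L of count (ans[r::L]) base[(r+j)%L]
def SR (base : List Int) (j : Nat) (ans : List Int) : Int :=
  ((List.range base.length).map (fun r =>
    (PySem.List.count (strideSlice (ans.drop r) base.length) (base.getD ((r + j) % base.length) 0) : Int))).sum

theorem SR_cons (base : List Int) (n : Nat) (hn : base.length = n + 1) (j : Nat) (a : Int) (t : List Int) :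
    SR base j (a :: t)
      = (if base.getD (j % base.length) 0 == a then (1 : Int) else 0) + SR base (j + 1) t := by
  unfold SR
  rw [hn]
  conv_lhs => rw [List.range_succ_eq_map]
  conv_rhs => rw [List.range_succ]
  simp only [List.map_cons, List.sum_cons, List.map_map, List.map_append, List.sum_append,
    List.map_cons, List.sum_cons, List.map_nil, List.sum_nil, List.drop_zero,
    Function.comp_def, Nat.succ_eq_add_one]
  rw [strideSlice_cons]
  have hstep : ((List.range n).map (fun r =>
      (PySem.List.count (strideSlice ((a :: t).drop (r + 1)) (n + 1)) (base.getD ((r + 1 + j) % (n + 1)) 0) : Int)))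
      = ((List.range n).map (fun r =>
      (PySem.List.count (strideSlice (t.drop r) (n + 1)) (base.getD ((r + (j + 1)) % (n + 1)) 0) : Int))) := by
    refine List.map_congr_left (fun r _ => ?_)
    have h1 : (a :: t).drop (r + 1) = t.drop r := rfl
    have h2 : r + 1 + j = r + (j + 1) := by omega
    rw [h1, h2]
  have hlastidx : (n + (j + 1)) % (n + 1) = j % (n + 1) := by
    have h : n + (j + 1) = j + (n + 1) := by omega
    rw [h, Nat.add_mod_right]
  have hzeroidx : (0 + j) % (n + 1) = j % (n + 1) := by rw [Nat.zero_add]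
  rw [hstep, hlastidx, hzeroidx]
  have hsub : n + 1 - 1 = n := rfl
  rw [hsub]
  simp only [PySem.List.count, List.count_cons]
  push_cast
  by_cases h : a == base.getD (j % (n + 1)) 0
  · have h' : base.getD (j % (n + 1)) 0 == a := by simp only [beq_iff_eq] at *; omega
    rw [if_pos h, if_pos h']
    ring
  · have h' : ¬ (base.getD (j % (n + 1)) 0 == a) := by simp only [beq_iff_eq] at *; omega
    rw [if_neg h, if_neg h']
    ring

theorem SR_eq_cnt (base : List Int) (n : Nat) (hn : base.length = n + 1) (ans : List Int) :
    ∀ j, SR base j ans = cnt base j ans := by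
  induction ans with
  | nil =>
    intro j
    simp [SR, cnt, PySem.List.count, strideSlice_nil]
  | cons a t ih =>
    intro j
    rw [SR_cons base n hn j a t, cnt, ih (j + 1)]

-- B's foldl-of-counts is SR at rotation 0
theorem scoreB_eq_cnt (base ans : List Int) (n : Nat) (hn : base.length = n + 1) :
    scoreB ans base = cnt base 0 ans := by
  rw [← SR_eq_cnt base n hn ans 0]
  unfold scoreB SR
  rw [PySem.List.foldl_add
    (g := fun r => (PySem.List.count (strideSlice (ans.drop r) base.length) (base.getD r 0) : Int))]
  rw [zero_add]
  refine congrArg List.sum (List.map_congr_left (fun r hr => ?_))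
  have hrlt : r < base.length := List.mem_range.mp hr
  rw [Nat.add_zero, Nat.mod_eq_of_lt hrlt]

-- indexing into a flattened replicate is modulo indexing into the base list
theorem getD_flatten_replicate {α : Type} (l : List α) (n k : Nat) (d : α)
    (hk : k < n * l.length) :
    ((List.replicate n l).flatten).getD k d = l.getD (k % l.length) d := by
  induction n generalizing k with
  | zero => omega
  | succ n ih =>
    have hmul : (n + 1) * l.length = n * l.length + l.length := by ring
    rw [List.replicate_succ, List.flatten_cons]
    by_cases h : k < l.length
    · rw [List.getD_append _ _ _ _ h, Nat.mod_eq_of_lt h]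
    · rw [Nat.not_lt] at h
      rw [List.getD_append_right _ _ _ _ h, ih (k - l.length) (by omega),
        ← Nat.mod_eq_sub_mod h]

theorem pyGetD_pyRepeat {α : Type} (l : List α) (n : Int) (k : Nat) (d : α)
    (hk : k < n.toNat * l.length) :
    PySem.List.pyGetD (PySem.List.pyRepeat l n) (k : Int) d
      = l.getD (k % l.length) d := by
  rw [PySem.List.pyGetD_natCast, PySem.List.pyRepeat]
  exact getD_flatten_replicate l n.toNat k d hk

-- A's loop keeps the three cyclic match counts (with the constant labels 1, 2, 3)
theorem loopA_eq (ans : List Int) (k : Nat) (s1 s2 s3 : Int)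
    (hb : k + ans.length ≤ 10005) :
    (PySem.List.enumerate ans (k : Int)).foldl
        (solStepA (PySem.List.pyRepeat [1, 2, 3, 4, 5] (PySem.Int.floordiv 10000 5 + 1))
                  (PySem.List.pyRepeat [2, 1, 2, 3, 2, 4, 2, 5] (PySem.Int.floordiv 10000 7 + 1))
                  (PySem.List.pyRepeat [3, 3, 1, 1, 2, 2, 4, 4, 5, 5] (PySem.Int.floordiv 10000 10 + 1)))
        ((s1, 1), (s2, 2), (s3, 3))
      = ((s1 + cnt [1, 2, 3, 4, 5] k ans, 1),
         (s2 + cnt [2, 1, 2, 3, 2, 4, 2, 5] k ans, 2),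
         (s3 + cnt [3, 3, 1, 1, 2, 2, 4, 4, 5, 5] k ans, 3)) := by
  induction ans generalizing k s1 s2 s3 with
  | nil => simp [PySem.List.enumerate, cnt]
  | cons a t ih =>
    rw [PySem.List.enumerate_cons, List.foldl_cons]
    have h1 : PySem.List.pyGetD (PySem.List.pyRepeat ([1, 2, 3, 4, 5] : List Int) (PySem.Int.floordiv 10000 5 + 1)) (k : Int) 0
        = ([1, 2, 3, 4, 5] : List Int).getD (k % ([1, 2, 3, 4, 5] : List Int).length) 0 := by
      rw [pyGetD_pyRepeat _ _ _ _ (by simp at hb ⊢; omega)]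
    have h2 : PySem.List.pyGetD (PySem.List.pyRepeat ([2, 1, 2, 3, 2, 4, 2, 5] : List Int) (PySem.Int.floordiv 10000 7 + 1)) (k : Int) 0
        = ([2, 1, 2, 3, 2, 4, 2, 5] : List Int).getD (k % ([2, 1, 2, 3, 2, 4, 2, 5] : List Int).length) 0 := by
      rw [pyGetD_pyRepeat _ _ _ _ (by simp at hb ⊢; omega)]
    have h3 : PySem.List.pyGetD (PySem.List.pyRepeat ([3, 3, 1, 1, 2, 2, 4, 4, 5, 5] : List Int) (PySem.Int.floordiv 10000 10 + 1)) (k : Int) 0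
        = ([3, 3, 1, 1, 2, 2, 4, 4, 5, 5] : List Int).getD (k % ([3, 3, 1, 1, 2, 2, 4, 4, 5, 5] : List Int).length) 0 := by
      rw [pyGetD_pyRepeat _ _ _ _ (by simp at hb ⊢; omega)]
    have hk1 : ((k : Int) + 1) = ((k + 1 : Nat) : Int) := by push_cast; ring
    simp only [solStepA, h1, h2, h3, cnt]
    rw [hk1]
    split_ifs <;>
      rw [ih (k + 1) _ _ _ (by simp at hb ⊢; omega)] <;>
        simp [*, add_assoc]

-- A's sort-then-collect on the three scored pairs equals B's max-then-filter
set_option maxRecDepth 8000 in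
theorem final_eq (s1 s2 s3 : Int) :
    (((PySem.List.sorted [(s1, (1 : Int)), (s2, 2), (s3, 3)] (fun x => x.1) true).headD (0, 0)).2 ::
      ((PySem.List.sorted [(s1, (1 : Int)), (s2, 2), (s3, 3)] (fun x => x.1) true).tail.foldl
        (fun r p => if p.1 == ((PySem.List.sorted [(s1, (1 : Int)), (s2, 2), (s3, 3)] (fun x => x.1) true).headD (0, 0)).1
                    then r ++ [p.2] else r) []))
      = ((if s1 == max s1 (max s2 s3) then [(1 : Int)] else []) ++
          (if s2 == max s1 (max s2 s3) then [2] else []) ++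
          (if s3 == max s1 (max s2 s3) then [3] else [])) := by
  rw [PySem.List.sorted_rev_eq_foldl_insertBy]
  simp only [List.foldl_cons, List.foldl_nil]
  by_cases h21 : s1 < s2 <;> by_cases h31 : s1 < s3 <;> by_cases h32 : s2 < s3 <;>
    simp [PySem.List.insertBy, h21, h31, h32] <;>
    split_ifs <;>
    first | rfl | (exfalso; simp only [max_def] at *; split_ifs at * <;> omega)

-- ===== VERDICT (by name: the statement is the Claim_ definition above) =====
theorem solution_spec : Claim_equal_solution := by
  intro answers _ hpre
  unfold Spec_solution
  simp only [solution, solution_alt]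
  have hl := loopA_eq answers 0 0 0 0 (by simpa [Pre_solution] using hpre)
  simp only [Int.natCast_zero] at hl
  rw [hl]
  rw [scoreB_eq_cnt _ _ 4 rfl, scoreB_eq_cnt _ _ 7 rfl, scoreB_eq_cnt _ _ 9 rfl]
  simpa using final_eq (cnt [1, 2, 3, 4, 5] 0 answers) (cnt [2, 1, 2, 3, 2, 4, 2, 5] 0 answers)
    (cnt [3, 3, 1, 1, 2, 2, 4, 4, 5, 5] 0 answers)
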